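-- pv_equiv track=rewrite | github.com/picthaisky/Nexus-Agent | nexus_agent/core/knowledge_graph_engine.py | _bfs
-- ===== SOURCE A (Python) =====
-- from collections import defaultdict, deque
--
-- def _bfs(seeds: set[str], adjacency: dict[str, set[str]], depth: int) -> set[str]:
--     visited: set[str] = set(seeds)
--     queue: deque[tuple[str, int]] = deque((seed, 0) for seed in seeds)
--
--     while queue:
--         node, current_depth = queue.popleft()
--         if current_depth >= depth:
--             continue
--         for neighbor in adjacency.get(node, set()):
--             if neighbor in visited:
--                 continue
--             visited.add(neighbor)
--             queue.append((neighbor, current_depth + 1))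
--
--     return visited - seeds
-- ===== SOURCE B (Python) =====
-- def _bfs(seeds: set[str], adjacency: dict[str, set[str]], depth: int) -> set[str]:
--     visited: set[str] = set(seeds)
--     frontier = list(seeds)
--     for _ in range(depth):
--         if not frontier:
--             break
--         next_frontier: list[str] = []
--         for node in frontier:
--             for neighbor in adjacency.get(node, set()):
--                 if neighbor not in visited:
--                     visited.add(neighbor)
--                     next_frontier.append(neighbor)
--         frontier = next_frontier
--     return visited - seeds
-- ===== Notes on version B (the rewrite author's own statement) =====
-- stated objective: idiomatic
-- what changed: Replaced the depth-tagged deque (each element carries its BFS depth, popped one at a time) by a level-synchronous BFS: an outer loop bounded by depth expands a whole frontier list per iteration into the next frontier, with early exit when the frontier empties.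
import Mathlib
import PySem

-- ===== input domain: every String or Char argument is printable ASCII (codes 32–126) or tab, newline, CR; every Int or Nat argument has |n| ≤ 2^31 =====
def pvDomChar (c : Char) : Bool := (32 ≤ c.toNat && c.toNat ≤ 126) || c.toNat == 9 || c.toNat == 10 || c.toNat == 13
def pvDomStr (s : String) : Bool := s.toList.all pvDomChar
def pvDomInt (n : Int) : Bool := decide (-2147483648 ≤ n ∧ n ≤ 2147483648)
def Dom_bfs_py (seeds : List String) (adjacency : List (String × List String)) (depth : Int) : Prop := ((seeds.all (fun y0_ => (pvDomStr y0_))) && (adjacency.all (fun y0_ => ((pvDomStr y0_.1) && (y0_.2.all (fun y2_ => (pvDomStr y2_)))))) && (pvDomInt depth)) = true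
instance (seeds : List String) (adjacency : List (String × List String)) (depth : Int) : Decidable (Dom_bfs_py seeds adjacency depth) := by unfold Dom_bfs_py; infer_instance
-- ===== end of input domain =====

-- B replaces A's depth-tagged FIFO deque by a level-synchronous BFS (whole-frontier passes
-- under an outer depth-bounded loop); equivalence is about the return value (A mutates nothing).

-- ===== PORT A =====
-- all neighbour strings that can ever be enqueued (used only for termination of the queue loop)
def bfsAllNodes (adjacency : List (String × List String)) : List String :=
  adjacency.flatMap Prod.snd

-- number of potential nodes not yet visited (termination measure component)
def bfsRem (adjacency : List (String × List String)) (visited : PySem.Set String) : Nat :=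
  (bfsAllNodes adjacency).countP (fun x => !(PySem.Set.contains visited x))

-- body of A's inner `for neighbor in adjacency.get(node, set())` loop
def bfsStep (cd : Int) (st : PySem.Set String × List (String × Int)) (nb : String) :
    PySem.Set String × List (String × Int) :=
  if PySem.Set.contains st.1 nb then st else (PySem.Set.add st.1 nb, st.2 ++ [(nb, cd + 1)])

theorem bfsGetD_subset (adjacency : List (String × List String)) (node : String) :
    ∀ x ∈ PySem.Dict.getD ⟨adjacency⟩ node [], x ∈ bfsAllNodes adjacency := by
  intro x hx
  simp [PySem.Dict.getD, PySem.Dict.get?] at hx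
  rcases h : (adjacency.find? (fun p => p.1 == node)) with _ | p
  · rw [h] at hx; simp at hx
  · rw [h] at hx
    simp at hx
    have hp := List.mem_of_find?_eq_some h
    simp [bfsAllNodes]
    exact ⟨p.1, p.2, hp, hx⟩

theorem bfsRem_add_lt (adjacency : List (String × List String)) (v : PySem.Set String) (y : String)
    (hy : y ∈ bfsAllNodes adjacency) (hv : PySem.Set.contains v y = false) :
    bfsRem adjacency (v ++ [y]) < bfsRem adjacency v := by
  obtain ⟨l₁, l₂, hl⟩ := List.append_of_mem hy
  unfold bfsRem
  rw [hl]
  simp only [List.countP_append, List.countP_cons]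
  have h1 : l₁.countP (fun x => !(PySem.Set.contains (v ++ [y]) x))
      ≤ l₁.countP (fun x => !(PySem.Set.contains v x)) := by
    apply List.countP_mono_left; intro x _ hx
    simp [PySem.Set.contains] at hx ⊢
    intro h; exact absurd (Or.inl h) (by simpa using hx)
  have h2 : l₂.countP (fun x => !(PySem.Set.contains (v ++ [y]) x))
      ≤ l₂.countP (fun x => !(PySem.Set.contains v x)) := by
    apply List.countP_mono_left; intro x _ hx
    simp [PySem.Set.contains] at hx ⊢
    intro h; exact absurd (Or.inl h) (by simpa using hx)
  have hy1 : (!(PySem.Set.contains (v ++ [y]) y)) = false := by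
    simp [PySem.Set.contains]
  have hy2 : (!(PySem.Set.contains v y)) = true := by
    simp [PySem.Set.contains] at hv ⊢; exact hv
  have e1 : (if (!(PySem.Set.contains (v ++ [y]) y)) = true then 1 else 0) = 0 := by
    rw [hy1]; rfl
  have e2 : (if (!(PySem.Set.contains v y)) = true then 1 else 0) = 1 := by
    rw [hy2]; rfl
  rw [e1, e2]
  omega

theorem bfsStep_fold_measure (adjacency : List (String × List String)) (cd : Int) :
    ∀ (nbs : List String) (v : PySem.Set String) (q : List (String × Int)),
      (∀ x ∈ nbs, x ∈ bfsAllNodes adjacency) →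
      (nbs.foldl (bfsStep cd) (v, q)).2.length + 2 * bfsRem adjacency (nbs.foldl (bfsStep cd) (v, q)).1
        ≤ q.length + 2 * bfsRem adjacency v := by
  intro nbs
  induction nbs with
  | nil => intro v q _; simp
  | cons nb t ih =>
    intro v q hmem
    simp only [List.foldl_cons]
    rcases h : PySem.Set.contains v nb with _ | _
    · rw [show bfsStep cd (v, q) nb = (v ++ [nb], q ++ [(nb, cd + 1)]) by
        unfold bfsStep
        rw [if_neg (by simpa using h), PySem.Set.add, if_neg (by simpa using h)]]
      have hlt : bfsRem adjacency (v ++ [nb]) < bfsRem adjacency v :=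
        bfsRem_add_lt adjacency v nb (hmem nb (List.mem_cons_self)) h
      have := ih (v ++ [nb]) (q ++ [(nb, cd + 1)]) (fun x hx => hmem x (List.mem_cons_of_mem _ hx))
      simp at this ⊢
      omega
    · rw [show bfsStep cd (v, q) nb = (v, q) by unfold bfsStep; rw [if_pos h]]
      exact ih v q (fun x hx => hmem x (List.mem_cons_of_mem _ hx))

-- A's `while queue:` loop
def bfs_loop (adjacency : List (String × List String)) (depth : Int)
    (visited : PySem.Set String) (queue : List (String × Int)) : List String :=
  match queue with
  | [] => visited
  | (node, cd) :: rest =>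
    if cd ≥ depth then bfs_loop adjacency depth visited rest
    else
      let st := (PySem.Dict.getD ⟨adjacency⟩ node []).foldl (bfsStep cd) (visited, rest)
      bfs_loop adjacency depth st.1 st.2
termination_by queue.length + 2 * bfsRem adjacency visited
decreasing_by
  · simp
  · have h := bfsStep_fold_measure adjacency cd (PySem.Dict.getD ⟨adjacency⟩ node []) visited rest
      (bfsGetD_subset adjacency node)
    simp at h ⊢; omega

def bfs_py (seeds : List String) (adjacency : List (String × List String)) (depth : Int) : List String :=
  PySem.Set.diff
    (bfs_loop adjacency depth (PySem.Set.ofList seeds) (seeds.map (fun s => (s, (0 : Int)))))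
    (PySem.Set.ofList seeds)

-- ===== PORT B =====
-- body of B's `for neighbor in adjacency.get(node, set())` loop (acc = next_frontier)
def bfsInner (st : PySem.Set String × List String) (nb : String) : PySem.Set String × List String :=
  if PySem.Set.contains st.1 nb then st else (PySem.Set.add st.1 nb, st.2 ++ [nb])

-- body of B's `for node in frontier` loop
def bfsExpandNode (adjacency : List (String × List String))
    (st : PySem.Set String × List String) (node : String) : PySem.Set String × List String :=
  (PySem.Dict.getD ⟨adjacency⟩ node []).foldl bfsInner st

-- B's `for _ in range(depth)` loop with early break on empty frontier
def bfsLevelLoop (adjacency : List (String × List String)) :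
    Nat → PySem.Set String → List String → List String
  | 0, visited, _ => visited
  | n + 1, visited, frontier =>
    if frontier.isEmpty then visited
    else
      let st := frontier.foldl (bfsExpandNode adjacency) (visited, ([] : List String))
      bfsLevelLoop adjacency n st.1 st.2

def bfs_py_alt (seeds : List String) (adjacency : List (String × List String)) (depth : Int) : List String :=
  PySem.Set.diff
    (bfsLevelLoop adjacency depth.toNat (PySem.Set.ofList seeds) seeds)
    (PySem.Set.ofList seeds)

-- ===== PRECONDITION & SPEC =====
def Spec_bfs_py (seeds : List String) (adjacency : List (String × List String)) (depth : Int) (out : List String) : Prop := out = bfs_py_alt seeds adjacency depth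
instance (seeds : List String) (adjacency : List (String × List String)) (depth : Int) (out : List String) : Decidable (Spec_bfs_py seeds adjacency depth out) := by unfold Spec_bfs_py; infer_instance

-- ===== CLAIM (what is proved, stated in full; the proofs are below) =====
def Claim_equal_bfs_py : Prop := ∀ (seeds : List String) (adjacency : List (String × List String)) (depth : Int), Dom_bfs_py seeds adjacency depth → Spec_bfs_py seeds adjacency depth (bfs_py seeds adjacency depth)

-- ===== LEMMAS AND PROOFS =====

-- the accumulator of bfsInner is append-only
theorem bfsInner_acc : ∀ (nbs : List String) (v : PySem.Set String) (a : List String),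
    nbs.foldl bfsInner (v, a)
      = ((nbs.foldl bfsInner (v, [])).1, a ++ (nbs.foldl bfsInner (v, [])).2) := by
  intro nbs
  induction nbs with
  | nil => intro v a; simp
  | cons nb t ih =>
    intro v a
    simp only [List.foldl_cons]
    rcases h : PySem.Set.contains v nb with _ | _
    · rw [show bfsInner (v, a) nb = (PySem.Set.add v nb, a ++ [nb]) by
        unfold bfsInner; rw [if_neg (by simpa using h)]]
      rw [show bfsInner (v, []) nb = (PySem.Set.add v nb, [] ++ [nb]) by
        unfold bfsInner; rw [if_neg (by simpa using h)]]
      rw [ih (PySem.Set.add v nb) (a ++ [nb]), ih (PySem.Set.add v nb) ([] ++ [nb])]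
      simp
    · rw [show bfsInner (v, a) nb = (v, a) by unfold bfsInner; rw [if_pos h]]
      rw [show bfsInner (v, []) nb = (v, []) by unfold bfsInner; rw [if_pos h]]
      exact ih v a

-- A's inner fold is B's inner fold with depth tags appended behind the queue
theorem bfsStep_vs_inner (cd : Int) : ∀ (nbs : List String) (v : PySem.Set String) (q : List (String × Int)),
    nbs.foldl (bfsStep cd) (v, q)
      = ((nbs.foldl bfsInner (v, [])).1,
          q ++ ((nbs.foldl bfsInner (v, [])).2.map (fun s => (s, cd + 1)))) := by
  intro nbs
  induction nbs with
  | nil => intro v q; simp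
  | cons nb t ih =>
    intro v q
    simp only [List.foldl_cons]
    rcases h : PySem.Set.contains v nb with _ | _
    · rw [show bfsStep cd (v, q) nb = (PySem.Set.add v nb, q ++ [(nb, cd + 1)]) by
        unfold bfsStep; rw [if_neg (by simpa using h)]]
      rw [show bfsInner (v, []) nb = (PySem.Set.add v nb, [] ++ [nb]) by
        unfold bfsInner; rw [if_neg (by simpa using h)]]
      rw [ih (PySem.Set.add v nb) (q ++ [(nb, cd + 1)])]
      rw [bfsInner_acc t (PySem.Set.add v nb) ([] ++ [nb])]
      simp
    · rw [show bfsStep cd (v, q) nb = (v, q) by unfold bfsStep; rw [if_pos h]]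
      rw [show bfsInner (v, []) nb = (v, []) by unfold bfsInner; rw [if_pos h]]
      exact ih v q

-- the accumulator of bfsExpandNode is append-only
theorem bfsExpand_acc (adjacency : List (String × List String)) :
    ∀ (f : List String) (v : PySem.Set String) (a : List String),
    f.foldl (bfsExpandNode adjacency) (v, a)
      = ((f.foldl (bfsExpandNode adjacency) (v, [])).1,
          a ++ (f.foldl (bfsExpandNode adjacency) (v, [])).2) := by
  intro f
  induction f with
  | nil => intro v a; simp
  | cons n t ih =>
    intro v a
    simp only [List.foldl_cons]
    rw [show bfsExpandNode adjacency (v, a) n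
        = ((bfsExpandNode adjacency (v, []) n).1, a ++ (bfsExpandNode adjacency (v, []) n).2) from
      bfsInner_acc _ v a]
    rw [ih (bfsExpandNode adjacency (v, []) n).1 (a ++ (bfsExpandNode adjacency (v, []) n).2)]
    rw [ih (bfsExpandNode adjacency (v, []) n).1 (bfsExpandNode adjacency (v, []) n).2]
    simp

-- when every queued node is already at depth, A's loop drains the queue without visiting
theorem bfs_loop_skip (adjacency : List (String × List String)) (depth : Int) :
    ∀ (q : List (String × Int)) (v : PySem.Set String),
      (∀ p ∈ q, depth ≤ p.2) → bfs_loop adjacency depth v q = v := by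
  intro q
  induction q with
  | nil => intro v _; rw [bfs_loop]
  | cons p rest ih =>
    intro v hq
    obtain ⟨node, cd⟩ := p
    rw [bfs_loop]
    rw [if_pos (hq (node, cd) List.mem_cons_self)]
    exact ih v (fun p hp => hq p (List.mem_cons_of_mem _ hp))

-- core: draining one level of A's queue is one whole-frontier expansion of B
theorem bfs_loop_level (adjacency : List (String × List String)) (depth d : Int) (hd : d < depth) :
    ∀ (f1 : List String) (v : PySem.Set String) (f2 : List String),
      bfs_loop adjacency depth v (f1.map (fun s => (s, d)) ++ f2.map (fun s => (s, d + 1)))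
        = bfs_loop adjacency depth (f1.foldl (bfsExpandNode adjacency) (v, [])).1
            ((f2 ++ (f1.foldl (bfsExpandNode adjacency) (v, [])).2).map (fun s => (s, d + 1))) := by
  intro f1
  induction f1 with
  | nil => intro v f2; simp
  | cons n t ih =>
    intro v f2
    simp only [List.map_cons, List.cons_append, List.foldl_cons]
    rw [bfs_loop]
    rw [if_neg (by omega : ¬ d ≥ depth)]
    have hst := bfsStep_vs_inner d (PySem.Dict.getD ⟨adjacency⟩ n [])
      v (t.map (fun s => (s, d)) ++ f2.map (fun s => (s, d + 1)))
    simp only [hst]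
    rw [List.append_assoc, ← List.map_append]
    rw [ih ((PySem.Dict.getD ⟨adjacency⟩ n []).foldl bfsInner (v, [])).1
        (f2 ++ ((PySem.Dict.getD ⟨adjacency⟩ n []).foldl bfsInner (v, [])).2)]
    have e2 : t.foldl (bfsExpandNode adjacency) (bfsExpandNode adjacency (v, []) n)
        = ((t.foldl (bfsExpandNode adjacency)
              (((PySem.Dict.getD ⟨adjacency⟩ n []).foldl bfsInner (v, [])).1, [])).1,
            ((PySem.Dict.getD ⟨adjacency⟩ n []).foldl bfsInner (v, [])).2
              ++ (t.foldl (bfsExpandNode adjacency)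
                    (((PySem.Dict.getD ⟨adjacency⟩ n []).foldl bfsInner (v, [])).1, [])).2) := by
      rw [show bfsExpandNode adjacency (v, []) n
          = (((PySem.Dict.getD ⟨adjacency⟩ n []).foldl bfsInner (v, [])).1,
             ((PySem.Dict.getD ⟨adjacency⟩ n []).foldl bfsInner (v, [])).2) from rfl]
      exact bfsExpand_acc adjacency t _ _
    rw [e2]
    simp

-- A's queue loop on a single-depth frontier equals B's level loop
theorem bfs_loop_eq_level (adjacency : List (String × List String)) (depth : Int) :
    ∀ (k : Nat) (d : Int), d + k = depth →
      ∀ (v : PySem.Set String) (f : List String),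
        bfs_loop adjacency depth v (f.map (fun s => (s, d))) = bfsLevelLoop adjacency k v f := by
  intro k
  induction k with
  | zero =>
    intro d hd v f
    rw [bfsLevelLoop]
    apply bfs_loop_skip
    intro p hp
    simp at hp
    obtain ⟨s, _, rfl⟩ := hp
    simp
    omega
  | succ k ih =>
    intro d hd v f
    rw [bfsLevelLoop]
    rcases f with _ | ⟨n, t⟩
    · simp only [List.isEmpty_nil, if_pos]
      rw [List.map_nil, bfs_loop]
    · simp only [List.isEmpty_cons, Bool.false_eq_true, if_false]
      have hlt : d < depth := by omega
      have := bfs_loop_level adjacency depth d hlt (n :: t) v []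
      simp only [List.map_nil, List.append_nil, List.nil_append] at this
      rw [this]
      exact ih (d + 1) (by omega) _ _

-- ===== VERDICT (by name: the statement is the Claim_ definition above) =====
theorem bfs_py_spec : Claim_equal_bfs_py := by
  intro seeds adjacency depth _
  unfold Spec_bfs_py bfs_py bfs_py_alt
  by_cases h : 0 ≤ depth
  · rw [bfs_loop_eq_level adjacency depth depth.toNat 0 (by omega)]
  · rw [Int.toNat_of_nonpos (by omega)]
    rw [bfs_loop_skip adjacency depth _ _ (by intro p hp; simp at hp; obtain ⟨s, _, rfl⟩ := hp; simp; omega)]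
    rfl
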